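-- pv_equiv track=rewrite | github.com/mrdrozdov/chart-parser | train.py | get_offset_cache
-- ===== SOURCE A (Python) =====
-- def get_offset_cache(length):
--     offset_cache = {}
--     ncells = int(length * (1 + length) / 2)
--     for lvl in range(length):
--         level_length = length - lvl
--         ncells_less = int(level_length * (1 + level_length) / 2)
--         offset_cache[lvl] = ncells - ncells_less
--     return offset_cache
-- ===== SOURCE B (Python) =====
-- def get_offset_cache(length):
--     offset_cache = {}
--     offset = 0
--     prev = int(length * (1 + length) / 2)
--     for lvl in range(length):
--         offset_cache[lvl] = offset
--         nxt = length - lvl - 1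
--         cur = int(nxt * (1 + nxt) / 2)
--         offset += prev - cur
--         prev = cur
--     return offset_cache
-- ===== Notes on version B (the rewrite author's own statement) =====
-- stated objective: alternative
-- what changed: Replaced the per-level closed-form ncells - int(ll*(1+ll)/2) by a running prefix-sum: a single offset accumulator grows each level by the gap between consecutive rounded triangular numbers, telescoping to exactly A's value (float rounding included) on every length.
import Mathlib
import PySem

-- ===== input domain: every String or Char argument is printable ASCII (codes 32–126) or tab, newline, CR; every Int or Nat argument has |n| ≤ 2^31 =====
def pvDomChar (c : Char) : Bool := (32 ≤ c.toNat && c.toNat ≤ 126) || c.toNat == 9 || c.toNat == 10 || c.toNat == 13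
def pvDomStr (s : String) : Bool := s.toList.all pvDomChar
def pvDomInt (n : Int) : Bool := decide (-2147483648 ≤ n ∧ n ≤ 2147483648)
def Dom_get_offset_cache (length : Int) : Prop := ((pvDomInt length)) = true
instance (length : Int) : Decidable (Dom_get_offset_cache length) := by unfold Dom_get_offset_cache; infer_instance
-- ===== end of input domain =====

-- B replaces A's per-level closed form by a running prefix-sum of consecutive
-- rounded-triangular gaps; same asymptotic cost, equal output on every length.

-- ===== PORT A =====
-- Shared hand model of the Python expression int(k * (1 + k) / 2), which both A and B use:
-- int/int true division returns the double nearest to the quotient (ties to even). k*(1+k) is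
-- always even and nonnegative, so int(x/2) is the exact half of x rounded to 53-bit precision,
-- half to even; pvRoundHalfEven53 models that rounding exactly on nonnegative ints (exact
-- below 2^53, rounded above).
def pvRoundHalfEven53 (v : Int) : Int :=
  if v < 2 ^ 53 then v
  else
    let e : Nat := v.toNat.log2 - 52
    let q := v / 2 ^ e
    let r := v % 2 ^ e
    if r < 2 ^ (e - 1) then q * 2 ^ e
    else if 2 ^ (e - 1) < r then (q + 1) * 2 ^ e
    else (if q % 2 = 0 then q else q + 1) * 2 ^ e

-- int(x / 2) for a nonnegative even Python int x
def pvIntHalfFloat (x : Int) : Int := pvRoundHalfEven53 (PySem.Int.floordiv x 2)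

def get_offset_cache (length : Int) : List (Int × Int) :=
  let ncells := pvIntHalfFloat (length * (1 + length))
  ((PySem.List.pyRange 0 length 1).foldl
    (fun (offset_cache : PySem.Dict Int Int) lvl =>
      let level_length := length - lvl
      let ncells_less := pvIntHalfFloat (level_length * (1 + level_length))
      offset_cache.insert lvl (ncells - ncells_less))
    PySem.Dict.empty).items

-- ===== PORT B =====
-- fold state: (offset_cache, offset, prev)
def get_offset_cache_alt (length : Int) : List (Int × Int) :=
  (((PySem.List.pyRange 0 length 1).foldl
    (fun (p : PySem.Dict Int Int × Int × Int) lvl =>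
      let nxt := length - lvl - 1
      let cur := pvIntHalfFloat (nxt * (1 + nxt))
      (p.1.insert lvl p.2.1, p.2.1 + (p.2.2 - cur), cur))
    (PySem.Dict.empty, 0, pvIntHalfFloat (length * (1 + length)))).1).items

-- ===== PRECONDITION & SPEC =====
def Spec_get_offset_cache (length : Int) (out : List (Int × Int)) : Prop := out = get_offset_cache_alt length
instance (length : Int) (out : List (Int × Int)) : Decidable (Spec_get_offset_cache length out) := by unfold Spec_get_offset_cache; infer_instance

-- ===== CLAIM (what is proved, stated in full; the proofs are below) =====
def Claim_equal_get_offset_cache : Prop := ∀ (length : Int), Dom_get_offset_cache length → Spec_get_offset_cache length (get_offset_cache length)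

-- ===== LEMMAS AND PROOFS =====

-- loop invariant: after the first n levels the two folds hold the same dict, B's running
-- offset equals tri(L) - tri(L - n) and prev equals tri(L - n), tri k = pvIntHalfFloat (k*(1+k))
theorem pvInv (L : Int) :
    ∀ (n : Nat), (n : Int) ≤ L →
      ((PySem.List.pyRange 0 (n : Int) 1).foldl
          (fun (offset_cache : PySem.Dict Int Int) lvl =>
            offset_cache.insert lvl
              (pvIntHalfFloat (L * (1 + L)) - pvIntHalfFloat ((L - lvl) * (1 + (L - lvl)))))
          PySem.Dict.empty
        = ((PySem.List.pyRange 0 (n : Int) 1).foldl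
            (fun (p : PySem.Dict Int Int × Int × Int) lvl =>
              (p.1.insert lvl p.2.1,
               p.2.1 + (p.2.2 - pvIntHalfFloat ((L - lvl - 1) * (1 + (L - lvl - 1)))),
               pvIntHalfFloat ((L - lvl - 1) * (1 + (L - lvl - 1)))))
            (PySem.Dict.empty, 0, pvIntHalfFloat (L * (1 + L)))).1)
      ∧ ((PySem.List.pyRange 0 (n : Int) 1).foldl
            (fun (p : PySem.Dict Int Int × Int × Int) lvl =>
              (p.1.insert lvl p.2.1,
               p.2.1 + (p.2.2 - pvIntHalfFloat ((L - lvl - 1) * (1 + (L - lvl - 1)))),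
               pvIntHalfFloat ((L - lvl - 1) * (1 + (L - lvl - 1)))))
            (PySem.Dict.empty, 0, pvIntHalfFloat (L * (1 + L)))).2.1
          = pvIntHalfFloat (L * (1 + L)) - pvIntHalfFloat ((L - n) * (1 + (L - n)))
      ∧ ((PySem.List.pyRange 0 (n : Int) 1).foldl
            (fun (p : PySem.Dict Int Int × Int × Int) lvl =>
              (p.1.insert lvl p.2.1,
               p.2.1 + (p.2.2 - pvIntHalfFloat ((L - lvl - 1) * (1 + (L - lvl - 1)))),
               pvIntHalfFloat ((L - lvl - 1) * (1 + (L - lvl - 1)))))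
            (PySem.Dict.empty, 0, pvIntHalfFloat (L * (1 + L)))).2.2
          = pvIntHalfFloat ((L - n) * (1 + (L - n))) := by
  intro n
  induction n with
  | zero =>
    intro _
    rw [PySem.List.pyRange_one_eq_nil (by norm_num)]
    simp
  | succ m ih =>
    intro hm
    have hm' : (m : Int) ≤ L := by push_cast at hm ⊢; omega
    obtain ⟨ihd, iho, ihp⟩ := ih hm'
    have hsplit : PySem.List.pyRange 0 ((m : Nat) + 1 : Nat) 1
        = PySem.List.pyRange 0 (m : Int) 1 ++ [(m : Int)] := by
      push_cast
      exact PySem.List.pyRange_one_succ_right (by positivity)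
    rw [hsplit, List.foldl_append, List.foldl_append]
    have harg : L - (m : Int) - 1 = L - ((m : Nat) + 1 : Nat) := by push_cast; ring
    refine ⟨?_, ?_, ?_⟩
    · simp only [List.foldl_cons, List.foldl_nil]
      rw [ihd, iho]
    · simp only [List.foldl_cons, List.foldl_nil]
      rw [iho, ihp, harg]
      ring
    · simp only [List.foldl_cons, List.foldl_nil]
      rw [harg]

-- ===== VERDICT (by name: the statement is the Claim_ definition above) =====
theorem get_offset_cache_spec : Claim_equal_get_offset_cache := by
  intro L _
  unfold Spec_get_offset_cache get_offset_cache get_offset_cache_alt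
  by_cases hpos : L ≤ 0
  · rw [PySem.List.pyRange_one_eq_nil (by omega)]
    rfl
  · have hL' : L = ((L.toNat : Nat) : Int) := by omega
    rw [hL']
    exact congrArg PySem.Dict.items
      ((pvInv ((L.toNat : Nat) : Int) L.toNat (le_refl _)).1)
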